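-- pv_equiv track=rewrite | github.com/YuliaZamriy/Python-practice | powerSets.py | yieldAllCombos
-- ===== SOURCE A (Python) =====
-- def yieldAllCombos(items):
--     """
--       Generates all combinations of N items into two bags, whereby each
--       item is in one or zero bags.
--
--       Yields a tuple, (bag1, bag2), where each bag is represented as
--       a list of which item(s) are in each bag.
--     """
--     N = len(items)
--     for i in range(3**N):
--         bag1 = []
--         bag2 = []
--         for j in range(N):
--             if (i // (3**j)) % 3 == 1:
--                 bag1.append(items[j])
--             elif (i // (3**j)) % 3 == 2:
--                 bag2.append(items[j])
--         yield (bag1, bag2)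
-- ===== SOURCE B (Python) =====
-- def yieldAllCombos(items):
--     """Recursive enumeration: each item goes to neither bag, bag1, or bag2;
--     item 0 varies fastest (tail-first recursion)."""
--     def gen(rest):
--         if not rest:
--             yield ([], [])
--             return
--         x = rest[0]
--         for b1, b2 in gen(rest[1:]):
--             yield (b1, b2)
--             yield ([x] + b1, b2)
--             yield (b1, [x] + b2)
--     yield from gen(items)
-- ===== Notes on version B (the rewrite author's own statement) =====
-- stated objective: alternative
-- what changed: Replaces the base-3 integer-counter double loop (decoding each of the 3^N indices digit by digit with powers 3**j) by a tail-first recursive enumeration that, for each sub-assignment of the remaining items, emits the three placements of the first item, sharing structure and computing no powers.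
import Mathlib
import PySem

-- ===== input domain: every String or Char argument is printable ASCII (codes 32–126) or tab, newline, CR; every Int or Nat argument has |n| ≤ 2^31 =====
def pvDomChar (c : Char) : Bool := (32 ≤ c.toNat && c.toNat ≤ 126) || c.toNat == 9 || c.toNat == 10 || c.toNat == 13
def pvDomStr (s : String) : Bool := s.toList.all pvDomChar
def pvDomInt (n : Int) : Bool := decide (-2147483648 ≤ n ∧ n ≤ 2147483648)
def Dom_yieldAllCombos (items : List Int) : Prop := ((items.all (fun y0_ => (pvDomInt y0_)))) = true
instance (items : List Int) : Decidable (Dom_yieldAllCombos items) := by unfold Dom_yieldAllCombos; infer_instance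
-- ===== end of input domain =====

-- B replaces A's base-3 counter decoding with a tail-first recursive enumeration
-- (alternative decomposition, same output order). Both are ported as LISTS of the
-- generators' yielded pairs.

-- ===== PORT A =====
-- A decodes each i in range(3**N) digit by digit; j ≥ 0 always, so j.toNat is exact,
-- and items[j] with 0 ≤ j < len(items) is exact via pyGetD.
def yieldAllCombos (items : List Int) : List (List Int × List Int) :=
  let N := items.length
  (PySem.List.pyRange 0 ((3:Int)^N) 1).map (fun i =>
    (PySem.List.pyRange 0 (N:Int) 1).foldl (fun (b : List Int × List Int) j =>
      if PySem.Int.mod (PySem.Int.floordiv i ((3:Int)^j.toNat)) 3 = 1 then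
        (b.1 ++ [PySem.List.pyGetD items j 0], b.2)
      else if PySem.Int.mod (PySem.Int.floordiv i ((3:Int)^j.toNat)) 3 = 2 then
        (b.1, b.2 ++ [PySem.List.pyGetD items j 0])
      else b) ([], []))

-- ===== PORT B =====
-- gen(rest) from Source B: tail-first recursion, first item varies fastest.
def pvGen : List Int → List (List Int × List Int)
  | [] => [([], [])]
  | x :: rest =>
    (pvGen rest).flatMap (fun p => [(p.1, p.2), (x :: p.1, p.2), (p.1, x :: p.2)])

def yieldAllCombos_alt (items : List Int) : List (List Int × List Int) :=
  pvGen items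

-- ===== PRECONDITION & SPEC =====
def Spec_yieldAllCombos (items : List Int) (out : List (List Int × List Int)) : Prop := out = yieldAllCombos_alt items
instance (items : List Int) (out : List (List Int × List Int)) : Decidable (Spec_yieldAllCombos items out) := by unfold Spec_yieldAllCombos; infer_instance

-- ===== CLAIM (what is proved, stated in full; the proofs are below) =====
def Claim_equal_yieldAllCombos : Prop := ∀ (items : List Int), Dom_yieldAllCombos items → Spec_yieldAllCombos items (yieldAllCombos items)

-- ===== LEMMAS AND PROOFS =====

-- A's bags for a fixed counter value i, as filters over the item indices.
def pvBagsA (i : Nat) (items : List Int) : List Int × List Int :=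
  (((List.range items.length).filter (fun j => i / 3^j % 3 == 1)).map (fun j => items.getD j 0),
   ((List.range items.length).filter (fun j => i / 3^j % 3 == 2)).map (fun j => items.getD j 0))

lemma pvBagsA_cons (i : Nat) (x : Int) (rest : List Int) :
    pvBagsA i (x :: rest) =
      (if i % 3 = 1 then ((pvBagsA (i/3) rest).1.cons x, (pvBagsA (i/3) rest).2)
       else if i % 3 = 2 then ((pvBagsA (i/3) rest).1, (pvBagsA (i/3) rest).2.cons x)
       else pvBagsA (i/3) rest) := by
  have hd : ∀ j : Nat, i / 3 ^ (j+1) = (i / 3) / 3 ^ j := by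
    intro j
    rw [Nat.div_div_eq_div_mul, pow_succ']
  unfold pvBagsA
  simp only [List.length_cons, List.range_succ_eq_map, List.filter_cons,
    List.filter_map, pow_zero, Nat.div_one]
  have hcomp : ∀ r : Nat,
      ((fun j => i / 3 ^ j % 3 == r) ∘ Nat.succ) = (fun j => (i/3) / 3 ^ j % 3 == r) := by
    intro r; funext j; simp [Function.comp, hd j]
  rw [hcomp, hcomp]
  by_cases h1 : i % 3 = 1 <;> by_cases h2 : i % 3 = 2
  · exact absurd h2 (by omega)
  all_goals simp [h1, h2, List.map_map]

lemma pvRange3 (m : Nat) :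
    List.range (3*m) = (List.range m).flatMap (fun q => [3*q, 3*q+1, 3*q+2]) := by
  induction m with
  | zero => simp
  | succ m ih =>
    have h : 3 * (m+1) = (3*m + 1) + 1 + 1 := by ring
    rw [h, List.range_succ, List.range_succ, List.range_succ, ih, List.range_succ]
    simp

lemma pvOuter (items : List Int) :
    (List.range (3^items.length)).map (fun i => pvBagsA i items) = pvGen items := by
  induction items with
  | nil => simp [pvGen, pvBagsA]
  | cons x rest ih =>
    have hlen : 3 ^ (x :: rest).length = 3 * 3 ^ rest.length := by
      simp [pow_succ']
    rw [hlen, pvRange3, List.map_flatMap, pvGen, ← ih, List.flatMap_map]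
    apply List.flatMap_congr
    intro q _
    have e0 : (3*q) / 3 = q := by omega
    have e0' : (3*q) % 3 = 0 := by omega
    have e1 : (3*q+1) / 3 = q := by omega
    have e1' : (3*q+1) % 3 = 1 := by omega
    have e2 : (3*q+2) / 3 = q := by omega
    have e2' : (3*q+2) % 3 = 2 := by omega
    simp [pvBagsA_cons, e0, e0', e1, e1', e2, e2']

lemma pvInner (items : List Int) (iN : Nat) :
    ((PySem.List.pyRange 0 (items.length:Int) 1).foldl (fun (b : List Int × List Int) j =>
      if PySem.Int.mod (PySem.Int.floordiv ((iN:Nat):Int) ((3:Int)^j.toNat)) 3 = 1 then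
        (b.1 ++ [PySem.List.pyGetD items j 0], b.2)
      else if PySem.Int.mod (PySem.Int.floordiv ((iN:Nat):Int) ((3:Int)^j.toNat)) 3 = 2 then
        (b.1, b.2 ++ [PySem.List.pyGetD items j 0])
      else b) ([], [])) = pvBagsA iN items := by
  have hkey : ∀ j : Nat,
      PySem.Int.mod (PySem.Int.floordiv ((iN:Nat):Int) ((3:Int)^j)) 3 = ((iN / 3^j % 3 : Nat) : Int) := by
    intro j
    have h3 : ((3:Int)^j) = (((3^j : Nat) : Int)) := by push_cast; ring
    rw [h3, show (3:Int) = ((3:Nat):Int) by norm_num,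
      PySem.Int.floordiv_natCast, PySem.Int.mod_natCast]
  have hbody : (fun (b : List Int × List Int) (j : Int) =>
      if PySem.Int.mod (PySem.Int.floordiv ((iN:Nat):Int) ((3:Int)^j.toNat)) 3 = 1 then
        (b.1 ++ [PySem.List.pyGetD items j 0], b.2)
      else if PySem.Int.mod (PySem.Int.floordiv ((iN:Nat):Int) ((3:Int)^j.toNat)) 3 = 2 then
        (b.1, b.2 ++ [PySem.List.pyGetD items j 0])
      else b)
    = (fun (b : List Int × List Int) (j : Int) =>
        (if (iN / 3^j.toNat % 3 == 1 : Bool) then b.1 ++ [PySem.List.pyGetD items j 0] else b.1,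
         if (iN / 3^j.toNat % 3 == 2 : Bool) then b.2 ++ [PySem.List.pyGetD items j 0] else b.2)) := by
    funext b j
    rw [hkey j.toNat]
    have hcase : iN / 3 ^ j.toNat % 3 = 0 ∨ iN / 3 ^ j.toNat % 3 = 1 ∨ iN / 3 ^ j.toNat % 3 = 2 := by
      omega
    rcases hcase with h | h | h <;> rw [h] <;> simp
  rw [hbody,
    PySem.List.foldl_prod_mk
      (f := fun (acc : List Int) (j : Int) =>
        if (iN / 3^j.toNat % 3 == 1 : Bool) then acc ++ [PySem.List.pyGetD items j 0] else acc)
      (g := fun (acc : List Int) (j : Int) =>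
        if (iN / 3^j.toNat % 3 == 2 : Bool) then acc ++ [PySem.List.pyGetD items j 0] else acc),
    PySem.List.foldl_append_if (p := fun j : Int => (iN / 3^j.toNat % 3 == 1 : Bool)),
    PySem.List.foldl_append_if (p := fun j : Int => (iN / 3^j.toNat % 3 == 2 : Bool))]
  rw [PySem.List.pyRange_zero_nat]
  simp [pvBagsA, List.filter_map, List.map_map, Function.comp_def]

-- ===== VERDICT (by name: the statement is the Claim_ definition above) =====
theorem yieldAllCombos_spec : Claim_equal_yieldAllCombos := by
  intro items _
  show yieldAllCombos items = yieldAllCombos_alt items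
  simp only [yieldAllCombos, yieldAllCombos_alt]
  have h3 : ((3:Int)^items.length) = (((3^items.length : Nat) : Int)) := by push_cast; ring
  rw [h3, PySem.List.pyRange_zero_nat (3 ^ items.length), List.map_map, ← pvOuter]
  apply List.map_congr_left
  intro iN _
  simpa using pvInner items iN
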